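-- pv_equiv track=rewrite | github.com/ehghks021203/CodingTest | Baekjoon/Class1/B2_3052.py | solution
-- ===== SOURCE A (Python) =====
-- def solution(seq: list) -> int:
-- 	count = 0
-- 	history = []
-- 	for s in seq:
-- 		if s % 42 not in history:
-- 			history.append(s % 42)
-- 			count += 1
-- 	return count
-- ===== SOURCE B (Python) =====
-- def solution(seq: list) -> int:
--     rems = sorted(s % 42 for s in seq)
--     count = 0
--     prev = None
--     for r in rems:
--         if r != prev:
--             count += 1
--             prev = r
--     return count
-- ===== Notes on version B (the rewrite author's own statement) =====
-- stated objective: alternative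
-- what changed: Sort-then-scan: sorts the remainders and counts runs by comparing each element to its predecessor, instead of A's incremental membership testing against a growing history list.
import Mathlib
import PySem

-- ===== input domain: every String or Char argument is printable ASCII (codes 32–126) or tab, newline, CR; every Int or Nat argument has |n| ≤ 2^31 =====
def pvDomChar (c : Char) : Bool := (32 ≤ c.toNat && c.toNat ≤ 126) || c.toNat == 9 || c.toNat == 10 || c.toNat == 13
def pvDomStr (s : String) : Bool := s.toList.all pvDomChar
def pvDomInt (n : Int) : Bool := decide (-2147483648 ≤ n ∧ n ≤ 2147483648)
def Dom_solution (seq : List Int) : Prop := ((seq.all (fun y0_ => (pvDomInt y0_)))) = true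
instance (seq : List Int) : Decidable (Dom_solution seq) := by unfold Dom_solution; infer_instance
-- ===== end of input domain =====

-- B sorts the remainders and counts runs by comparing each element with its predecessor
-- (sort-then-scan), instead of A's incremental membership test against a growing history list.

-- ===== PORT A =====
def solution (seq : List Int) : Int :=
  (seq.foldl
    (fun (st : Int × List Int) s =>
      if PySem.Int.mod s 42 ∉ st.2 then (st.1 + 1, st.2 ++ [PySem.Int.mod s 42]) else st)
    (0, [])).1

-- ===== PORT B =====
def solution_alt (seq : List Int) : Int :=
  let rems := PySem.List.sorted (seq.map (fun s => PySem.Int.mod s 42)) (fun x => x) false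
  (rems.foldl
    (fun (st : Int × Option Int) r =>
      if some r ≠ st.2 then (st.1 + 1, some r) else st)
    (0, none)).1

-- ===== PRECONDITION & SPEC =====
def Spec_solution (seq : List Int) (out : Int) : Prop := out = solution_alt seq
instance (seq : List Int) (out : Int) : Decidable (Spec_solution seq out) := by unfold Spec_solution; infer_instance

-- ===== CLAIM =====
def Claim_equal_solution : Prop := ∀ (seq : List Int), Dom_solution seq → Spec_solution seq (solution seq)

-- ===== LEMMAS AND PROOFS =====

-- A's loop counts the distinct remainders: invariant count = history.length, history nodup.
lemma pvA (seq : List Int) : ∀ (h : List Int), h.Nodup →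
    (seq.foldl
      (fun (st : Int × List Int) s =>
        if PySem.Int.mod s 42 ∉ st.2 then (st.1 + 1, st.2 ++ [PySem.Int.mod s 42]) else st)
      ((h.length : Int), h)).1
    = ((h.toFinset ∪ (seq.map (fun s => PySem.Int.mod s 42)).toFinset).card : Int) := by
  induction seq with
  | nil =>
    intro h hnd
    simp [List.toFinset_card_of_nodup hnd]
  | cons s rest ih =>
    intro h hnd
    simp only [List.foldl_cons, List.map_cons, List.toFinset_cons]
    by_cases hin : PySem.Int.mod s 42 ∈ h
    · rw [if_neg (not_not_intro hin)]
      have := ih h hnd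
      rw [this]
      congr 2
      have hf : PySem.Int.mod s 42 ∈ h.toFinset := List.mem_toFinset.mpr hin
      ext x
      simp only [Finset.mem_union, Finset.mem_insert]
      constructor
      · rintro (hx | hx)
        · exact Or.inl hx
        · exact Or.inr (Or.inr hx)
      · rintro (hx | hx | hx)
        · exact Or.inl hx
        · exact Or.inl (hx ▸ hf)
        · exact Or.inr hx
    · rw [if_pos hin]
      have hnd' : (h ++ [PySem.Int.mod s 42]).Nodup := by
        rw [List.nodup_append]
        refine ⟨hnd, List.nodup_singleton _, ?_⟩
        intro a ha b hb
        rw [List.mem_singleton] at hb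
        subst hb
        exact fun he => hin (he ▸ ha)
      have hlen : ((h ++ [PySem.Int.mod s 42]).length : Int) = (h.length : Int) + 1 := by
        simp
      have := ih (h ++ [PySem.Int.mod s 42]) hnd'
      rw [← hlen, this]
      congr 2
      rw [List.toFinset_append]
      ext x
      simp only [Finset.mem_union, Finset.mem_insert, List.mem_toFinset, List.mem_cons,
        List.not_mem_nil, or_false]
      tauto

-- |insert r s| = |s \\ {r}| + 1.
lemma pvCardInsert (r : Int) (s : Finset Int) :
    ((insert r s).card : Int) = ((s.erase r).card : Int) + 1 := by
  have h : insert r s = insert r (s.erase r) := by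
    ext x; by_cases hx : x = r <;> simp [hx]
  rw [h, Finset.card_insert_of_notMem (Finset.notMem_erase _ _)]
  push_cast
  ring

-- B's scan over a sorted list, prev = some p with p below every element.
lemma pvScan_some : ∀ (l : List Int) (c p : Int), l.Pairwise (· ≤ ·) → (∀ x ∈ l, p ≤ x) →
    (l.foldl
      (fun (st : Int × Option Int) r =>
        if some r ≠ st.2 then (st.1 + 1, some r) else st)
      (c, some p)).1
    = c + ((l.toFinset.erase p).card : Int) := by
  intro l
  induction l with
  | nil => intro c p _ _; simp
  | cons r rest ih =>
    intro c p hp hle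
    have hrrest : ∀ x ∈ rest, r ≤ x := fun x hx => (List.pairwise_cons.mp hp).1 x hx
    have hrest : rest.Pairwise (· ≤ ·) := (List.pairwise_cons.mp hp).2
    have hpr : p ≤ r := hle r (List.mem_cons_self ..)
    simp only [List.foldl_cons, List.toFinset_cons]
    by_cases heq : r = p
    · rw [if_neg (by simp [heq])]
      rw [ih c p hrest (fun x hx => le_trans hpr (hrrest x hx))]
      rw [heq, Finset.erase_insert_eq_erase]
    · rw [if_pos (by simp [heq])]
      rw [ih (c + 1) r hrest hrrest]
      have hplt : p < r := lt_of_le_of_ne hpr (fun h => heq h.symm)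
      have hnp : p ∉ insert r rest.toFinset := by
        intro hmem
        rcases Finset.mem_insert.mp hmem with h | h
        · exact absurd h.symm heq
        · exact absurd (hrrest p (List.mem_toFinset.mp h)) (not_le.mpr hplt)
      rw [Finset.erase_eq_of_notMem hnp]
      rw [pvCardInsert]
      ring

lemma pvScan_none (l : List Int) (c : Int) (hp : l.Pairwise (· ≤ ·)) :
    (l.foldl
      (fun (st : Int × Option Int) r =>
        if some r ≠ st.2 then (st.1 + 1, some r) else st)
      (c, none)).1
    = c + (l.toFinset.card : Int) := by
  cases l with
  | nil => simp
  | cons r rest =>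
    have hrrest : ∀ x ∈ rest, r ≤ x := fun x hx => (List.pairwise_cons.mp hp).1 x hx
    have hrest : rest.Pairwise (· ≤ ·) := (List.pairwise_cons.mp hp).2
    simp only [List.foldl_cons, List.toFinset_cons]
    rw [if_pos (by simp)]
    rw [pvScan_some rest (c + 1) r hrest hrrest]
    rw [pvCardInsert]
    ring

-- ===== VERDICT =====
theorem solution_spec : Claim_equal_solution := by
  intro seq _
  unfold Spec_solution solution solution_alt
  have hA := pvA seq [] List.nodup_nil
  simp only [List.length_nil, Nat.cast_zero, List.toFinset_nil, Finset.empty_union] at hA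
  rw [hA]
  set rems := PySem.List.sorted (seq.map (fun s => PySem.Int.mod s 42)) (fun x => x) false with hr
  have hperm : rems.Perm (seq.map (fun s => PySem.Int.mod s 42)) := PySem.List.sorted_perm ..
  have hpw : rems.Pairwise (· ≤ ·) :=
    PySem.List.sorted_pairwise (xs := seq.map (fun s => PySem.Int.mod s 42)) (key := fun x => x)
  rw [pvScan_none rems 0 hpw]
  have hts : rems.toFinset = (seq.map (fun s => PySem.Int.mod s 42)).toFinset := by
    ext x
    simp only [List.mem_toFinset]
    exact hperm.mem_iff
  rw [hts]
  ring
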